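-- pv_equiv track=rewrite | github.com/yacoublambaz/EECE230PssSpring2022 | mar1st.py | countNumsWithIthDiv
-- ===== SOURCE A (Python) =====
-- def ithDivisor(n,i):
--     """
--     1- Find all divisors -> store in a list
--     2- find the ith element of all divisors
--     3- if n <= 0 or i <= 0: return -1
--     4- if no divisor whatsoever, return -1
--     5- if you're asking for an index that's higher
--     than how many divisors we have, return -1
--     """
--     if n <= 0 or i <= 0:
--         return -1
--     store = []
--     for j in range(1,n+1):
--         if n % j == 0:
--             store.append(j)
--     if len(store) == 0: #no divisors
--         return -1
--     if i > len(store):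
--         return -1
--     return store[i-1]
--
-- def countNumsWithIthDiv(n,i):
--     """
--     . if n <= 0 or i <= 0: return -1
--     0- count = 0
--     1- loop for k in range(n+1)
--         for each k, check if ithDivisor(k,3) does not return -1
--         if it doesn't return -1, count = count + 1
--     """
--     if n <= 0 or i <= 0:
--         return -1
--     count = 0
--     for k in range(1,n+1):
--         if ithDivisor(k,i) != -1:
--             count = count + 1
--     return count
-- ===== SOURCE B (Python) =====
-- def countNumsWithIthDiv(n, i):
--     # Divisor-count sieve: one pass adding 1 to every multiple of each d,
--     # then count the numbers with at least i divisors.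
--     if n <= 0 or i <= 0:
--         return -1
--     divcount = {}
--     for d in range(1, n + 1):
--         for m in range(d, n + 1, d):
--             divcount[m] = divcount.get(m, 0) + 1
--     count = 0
--     for k in range(1, n + 1):
--         if divcount.get(k, 0) >= i:
--             count = count + 1
--     return count
-- ===== Notes on version B (the rewrite author's own statement) =====
-- stated objective: faster
-- what changed: Replaced A's per-number trial-division scan (each k in 1..n tested against every j in 1..k via ithDivisor) by a single divisor-count sieve that adds 1 to a dict entry for every multiple of each d, then counts entries >= i.
import Mathlib
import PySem

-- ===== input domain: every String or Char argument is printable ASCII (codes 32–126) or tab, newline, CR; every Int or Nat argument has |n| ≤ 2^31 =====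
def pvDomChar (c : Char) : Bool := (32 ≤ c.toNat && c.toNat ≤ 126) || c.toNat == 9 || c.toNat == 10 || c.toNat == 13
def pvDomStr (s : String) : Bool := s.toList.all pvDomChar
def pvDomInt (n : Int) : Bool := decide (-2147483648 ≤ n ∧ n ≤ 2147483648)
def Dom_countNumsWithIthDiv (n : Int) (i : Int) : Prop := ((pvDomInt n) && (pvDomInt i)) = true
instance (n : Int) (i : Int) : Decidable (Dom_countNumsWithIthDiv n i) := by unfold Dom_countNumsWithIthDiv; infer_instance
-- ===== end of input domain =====

-- B replaces A's per-number trial-division scan by a divisor-count sieve (dict of counts); objective: faster.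

-- ===== PORT A =====
def ithDivisor (n : Int) (i : Int) : Int :=
  if n ≤ 0 ∨ i ≤ 0 then -1
  else
    let store := (PySem.List.pyRange 1 (n+1)).foldl
      (fun acc j => if PySem.Int.mod n j == 0 then acc ++ [j] else acc) []
    if (store.length : Int) = 0 then -1
    else if i > (store.length : Int) then -1
    else (PySem.List.pyGet? store (i - 1)).getD 0
      -- the two guards ensure 0 ≤ i-1 < len(store), so pyGet? is never none here

def countNumsWithIthDiv (n : Int) (i : Int) : Int :=
  if n ≤ 0 ∨ i ≤ 0 then -1
  else (PySem.List.pyRange 1 (n+1)).foldl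
    (fun count k => if ithDivisor k i ≠ -1 then count + 1 else count) 0

-- ===== PORT B =====
def countNumsWithIthDiv_alt (n : Int) (i : Int) : Int :=
  if n ≤ 0 ∨ i ≤ 0 then -1
  else
    let divcount : PySem.Dict Int Int := (PySem.List.pyRange 1 (n+1)).foldl
      (fun d dv => (PySem.List.pyRange dv (n+1) dv).foldl
        (fun d m => d.modify m 0 (· + 1)) d) PySem.Dict.empty
    (PySem.List.pyRange 1 (n+1)).foldl
      (fun count k => if divcount.getD k 0 ≥ i then count + 1 else count) 0

-- ===== PRECONDITION & SPEC =====
def Spec_countNumsWithIthDiv (n : Int) (i : Int) (out : Int) : Prop := out = countNumsWithIthDiv_alt n i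
instance (n : Int) (i : Int) (out : Int) : Decidable (Spec_countNumsWithIthDiv n i out) := by unfold Spec_countNumsWithIthDiv; infer_instance

-- ===== CLAIM (what is proved, stated in full; the proofs are below) =====
def Claim_equal_countNumsWithIthDiv : Prop := ∀ (n : Int) (i : Int), Dom_countNumsWithIthDiv n i → Spec_countNumsWithIthDiv n i (countNumsWithIthDiv n i)

-- ===== LEMMAS AND PROOFS =====

-- the sieve dict's value at k: the outer fold adds, for each divisor dv processed, the
-- number of occurrences of k among the multiples pyRange dv N dv
theorem sieve_getD (N : Int) (ds : List Int) (d0 : PySem.Dict Int Int) (k : Int) :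
    (ds.foldl (fun d dv => (PySem.List.pyRange dv N dv).foldl
        (fun d m => d.modify m 0 (· + 1)) d) d0).getD k 0
      = d0.getD k 0 + ((ds.map (fun dv => ((PySem.List.pyRange dv N dv).count k : Int))).sum) := by
  induction ds generalizing d0 with
  | nil => simp
  | cons dv t ih =>
    simp only [List.foldl_cons, ih, PySem.Dict.getD_foldl_modify_add_one, List.map_cons,
      List.sum_cons]
    ring

theorem count_pyRange_step (dv N k : Int) (hdv : 1 ≤ dv) (hk : 1 ≤ k) (hkN : k < N) :
    ((PySem.List.pyRange dv N dv).count k : Int) = if dv ∣ k then 1 else 0 := by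
  have hnd : (PySem.List.pyRange dv N dv).Nodup := by
    rw [PySem.List.pyRange_of_pos dv N (by omega)]
    refine List.Nodup.map ?_ List.nodup_range
    intro a b hab
    have h1 := add_left_cancel hab
    have h2 : (a : Int) = (b : Int) := mul_left_cancel₀ (by omega) h1
    exact_mod_cast h2
  by_cases h : dv ∣ k
  · have hmem : k ∈ PySem.List.pyRange dv N dv := by
      rw [PySem.List.mem_pyRange_iff_of_pos (by omega)]
      exact ⟨Int.le_of_dvd (by omega) h, hkN, dvd_sub h (dvd_refl dv)⟩
    simp [List.count_eq_one_of_mem hnd hmem, h]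
  · have hnm : k ∉ PySem.List.pyRange dv N dv := by
      rw [PySem.List.mem_pyRange_iff_of_pos (by omega)]
      rintro ⟨_, _, hd⟩
      exact h (by simpa using dvd_add hd (dvd_refl dv))
    simp [List.count_eq_zero_of_not_mem hnm, h]

-- A's inner divisor list length, as a countP
def divA (k : Int) : Nat :=
  List.countP (fun j => PySem.Int.mod k j == 0) (PySem.List.pyRange 1 (k+1))

theorem sieve_value (n k : Int) (_hn : 1 ≤ n) (hk : 1 ≤ k) (hkn : k ≤ n) :
    ((PySem.List.pyRange 1 (n+1)).foldl
      (fun d dv => (PySem.List.pyRange dv (n+1) dv).foldl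
        (fun d m => d.modify m 0 (· + 1)) d) PySem.Dict.empty).getD k 0
    = (List.countP (fun dv => decide (dv ∣ k)) (PySem.List.pyRange 1 (n+1)) : Int) := by
  rw [sieve_getD]
  have hmap : (PySem.List.pyRange 1 (n+1)).map
      (fun dv => ((PySem.List.pyRange dv (n+1) dv).count k : Int))
      = (PySem.List.pyRange 1 (n+1)).map
      (fun dv => if decide (dv ∣ k) = true then 1 else 0) := by
    refine List.map_congr_left ?_
    intro dv hdv
    rw [PySem.List.mem_pyRange_one] at hdv
    rw [count_pyRange_step dv (n+1) k (by omega) hk (by omega)]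
    by_cases h : dv ∣ k <;> simp [h]
  rw [hmap, PySem.List.sum_map_ite_one_zero]
  simp

theorem ithDivisor_ne_iff (k i : Int) (hk : 1 ≤ k) (hi : 1 ≤ i) :
    ithDivisor k i ≠ -1 ↔ i ≤ (divA k : Int) := by
  have hguard : ¬ (k ≤ 0 ∨ i ≤ 0) := by omega
  have hstore : (PySem.List.pyRange 1 (k+1)).foldl
      (fun acc j => if PySem.Int.mod k j == 0 then acc ++ [j] else acc) []
      = (PySem.List.pyRange 1 (k+1)).filter (fun j => PySem.Int.mod k j == 0) := by
    simpa using PySem.List.foldl_append_if_eq_filter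
      (fun j => PySem.Int.mod k j == 0) (PySem.List.pyRange 1 (k+1)) []
  have hlen : ((PySem.List.pyRange 1 (k+1)).filter
      (fun j => PySem.Int.mod k j == 0)).length = divA k := by
    simp [divA, List.countP_eq_length_filter]
  unfold ithDivisor
  rw [if_neg hguard]
  simp only [hstore, hlen]
  by_cases hle : i ≤ (divA k : Int)
  · have hpos : 0 < divA k := by omega
    rw [if_neg (by omega), if_neg (by omega)]
    -- result is an element of store, hence ≥ 1
    have hidx : (i - 1).toNat < ((PySem.List.pyRange 1 (k+1)).filter
        (fun j => PySem.Int.mod k j == 0)).length := by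
      rw [hlen]; omega
    have hcast : i - 1 = ((i - 1).toNat : Int) := by omega
    rw [hcast, PySem.List.pyGet?_natCast]
    rw [List.getElem?_eq_getElem hidx]
    have hmemf := List.getElem_mem hidx
    have hmem : ((PySem.List.pyRange 1 (k+1)).filter
        (fun j => PySem.Int.mod k j == 0))[(i-1).toNat] ∈ PySem.List.pyRange 1 (k+1) :=
      List.mem_of_mem_filter hmemf
    rw [PySem.List.mem_pyRange_one] at hmem
    simp only [Option.getD_some]
    constructor
    · intro _; exact hle
    · intro _; omega
  · constructor
    · intro hne
      exfalso
      apply hne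
      by_cases h0 : (((PySem.List.pyRange 1 (k+1)).filter
          (fun j => PySem.Int.mod k j == 0)).length : Int) = 0
      · rw [if_pos (by simpa [hlen] using h0)]
      · rw [if_neg (by simpa [hlen] using h0), if_pos (by omega)]
    · intro h; exact absurd h hle

theorem divA_eq_countP (n k : Int) (_hn : 1 ≤ n) (hk : 1 ≤ k) (hkn : k ≤ n) :
    List.countP (fun dv => decide (dv ∣ k)) (PySem.List.pyRange 1 (n+1)) = divA k := by
  rw [PySem.List.pyRange_one_append 1 (k+1) (n+1) (by omega) (by omega), List.countP_append]
  have h2 : List.countP (fun dv => decide (dv ∣ k)) (PySem.List.pyRange (k+1) (n+1)) = 0 := by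
    rw [List.countP_eq_zero]
    intro dv hdv
    rw [PySem.List.mem_pyRange_one] at hdv
    simp only [decide_eq_true_eq]
    intro hdvd
    have := Int.le_of_dvd (by omega) hdvd
    omega
  rw [h2, Nat.add_zero, divA]
  refine List.countP_congr ?_
  intro j hj
  simp [PySem.Int.mod_eq_zero_iff_dvd]

-- ===== VERDICT (by name: the statement is the Claim_ definition above) =====
theorem countNumsWithIthDiv_spec : Claim_equal_countNumsWithIthDiv := by
  intro n i _
  unfold Spec_countNumsWithIthDiv countNumsWithIthDiv countNumsWithIthDiv_alt
  by_cases hni : n ≤ 0 ∨ i ≤ 0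
  · rw [if_pos hni, if_pos hni]
  · rw [if_neg hni, if_neg hni]
    rcases not_or.mp hni with ⟨hn1, hi1⟩
    rw [PySem.List.foldl_ite_add_one (fun k => ithDivisor k i ≠ -1),
        PySem.List.foldl_ite_add_one (fun k => _ ≥ i)]
    congr 1
    norm_cast
    refine List.countP_congr ?_
    intro k hk
    rw [PySem.List.mem_pyRange_one] at hk
    simp only [decide_eq_true_eq, ge_iff_le]
    rw [sieve_value n k (by omega) (by omega) (by omega),
        divA_eq_countP n k (by omega) (by omega) (by omega)]
    exact ithDivisor_ne_iff k i (by omega) (by omega)
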